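-- pv_equiv track=rewrite | github.com/mthrok/ml-blog | codes/2018-04-08-what-dense-layer-is-capable-of-pt2/plot_linear_regression_decoder.py | _get_different_meta_keys
-- ===== SOURCE A (Python) =====
-- from collections import defaultdict
--
-- def _get_different_meta_keys(metas):
--     key_patterns = defaultdict(set)
--     ignore_keys = {'input_data', 'n_train', 'input_label', 'v_max', 'v_min'}
--     for meta in metas:
--         for key, val in meta.items():
--             if key not in ignore_keys:
--                 key_patterns[key].add(val)
--     ret = []
--     for key, value in key_patterns.items():
--         if len(value) > 1:
--             ret.append(key)
--     return ret
-- ===== SOURCE B (Python) =====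
-- def _get_different_meta_keys(metas):
--     ignore_keys = {'input_data', 'n_train', 'input_label', 'v_max', 'v_min'}
--     first_seen = {}
--     differing = set()
--     for meta in metas:
--         for key, val in meta.items():
--             if key in ignore_keys:
--                 continue
--             if key not in first_seen:
--                 first_seen[key] = val
--             elif val != first_seen[key]:
--                 differing.add(key)
--     return [key for key in first_seen if key in differing]
-- ===== Notes on version B (the rewrite author's own statement) =====
-- stated objective: simpler
-- what changed: Instead of accumulating a full set of values per key and then filtering keys whose set has more than one element, B keeps only the first-seen value per key plus a 'differing' flag set, and emits the flagged keys in first-appearance order in a single comprehension.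
import Mathlib
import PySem

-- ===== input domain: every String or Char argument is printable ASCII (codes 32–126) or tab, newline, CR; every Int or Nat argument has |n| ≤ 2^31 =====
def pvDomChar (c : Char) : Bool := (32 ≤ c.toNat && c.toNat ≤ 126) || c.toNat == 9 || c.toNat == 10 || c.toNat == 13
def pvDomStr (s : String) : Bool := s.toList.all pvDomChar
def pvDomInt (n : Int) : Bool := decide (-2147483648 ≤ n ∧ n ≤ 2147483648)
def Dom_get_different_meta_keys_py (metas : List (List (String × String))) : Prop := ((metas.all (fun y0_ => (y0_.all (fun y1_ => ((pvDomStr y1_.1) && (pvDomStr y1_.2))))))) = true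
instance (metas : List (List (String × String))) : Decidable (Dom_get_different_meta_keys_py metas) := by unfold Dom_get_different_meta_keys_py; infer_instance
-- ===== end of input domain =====

-- B replaces A's per-key value-set accumulation plus final len>1 filter by a single pass keeping
-- one first-seen value per key plus a 'differing' flag set (objective: simpler state).
-- Each inner association list stands for a Python dict: both ports read it through
-- PySem.Dict.ofList (duplicate keys overwrite, insertion order), exactly as dict(...).items().

-- ===== PORT A =====
def pvIgnoreKeys : PySem.Set String :=
  PySem.Set.ofList ["input_data", "n_train", "input_label", "v_max", "v_min"]

-- loop body of A's nested loop: key_patterns[key].add(val) for non-ignored keys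
def pvStepA (kp : PySem.Dict String (PySem.Set String)) (kv : String × String) :
    PySem.Dict String (PySem.Set String) :=
  if pvIgnoreKeys.contains kv.1 then kp
  else kp.modify kv.1 PySem.Set.empty (fun s => s.add kv.2)

def get_different_meta_keys_py (metas : List (List (String × String))) : List String :=
  ((metas.foldl (fun kp m => ((PySem.Dict.ofList m).items).foldl pvStepA kp)
      PySem.Dict.empty).items).foldl
    (fun ret kv => if 1 < PySem.Set.len kv.2 then ret ++ [kv.1] else ret) []

-- ===== PORT B =====
-- loop body of B's nested loop over the pair (first_seen, differing)
def pvStepB (st : PySem.Dict String String × PySem.Set String) (kv : String × String) :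
    PySem.Dict String String × PySem.Set String :=
  if pvIgnoreKeys.contains kv.1 then st
  else
    match st.1.get? kv.1 with
    | none => (st.1.insert kv.1 kv.2, st.2)
    | some v0 => if kv.2 ≠ v0 then (st.1, st.2.add kv.1) else st

def get_different_meta_keys_py_alt (metas : List (List (String × String))) : List String :=
  ((metas.foldl (fun st m => ((PySem.Dict.ofList m).items).foldl pvStepB st)
      (PySem.Dict.empty, PySem.Set.empty)).1.keys).filter
    (fun k => (metas.foldl (fun st m => ((PySem.Dict.ofList m).items).foldl pvStepB st)
      (PySem.Dict.empty, PySem.Set.empty)).2.contains k)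

-- ===== PRECONDITION & SPEC =====
def Spec_get_different_meta_keys_py (metas : List (List (String × String))) (out : List String) : Prop := out = get_different_meta_keys_py_alt metas
instance (metas : List (List (String × String))) (out : List String) : Decidable (Spec_get_different_meta_keys_py metas out) := by unfold Spec_get_different_meta_keys_py; infer_instance

-- ===== CLAIM (what is proved, stated in full; the proofs are below) =====
def Claim_equal_get_different_meta_keys_py : Prop := ∀ (metas : List (List (String × String))), Dom_get_different_meta_keys_py metas → Spec_get_different_meta_keys_py metas (get_different_meta_keys_py metas)

-- ===== LEMMAS AND PROOFS =====

-- the coupling invariant between A's state (kp) and B's state (fs, df)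
def pvInv (kp : PySem.Dict String (PySem.Set String))
    (fs : PySem.Dict String String) (df : PySem.Set String) : Prop :=
  kp.keys = fs.keys ∧ kp.keys.Nodup ∧
  ∀ k, (k ∈ kp.keys →
          ∃ rest, kp.getD k PySem.Set.empty = fs.getD k "" :: rest ∧ (k ∈ df ↔ rest ≠ [])) ∧
       (k ∉ kp.keys → k ∉ df)

lemma pvInv_step (kp : PySem.Dict String (PySem.Set String))
    (fs : PySem.Dict String String) (df : PySem.Set String) (p : String × String)
    (h : pvInv kp fs df) :
    pvInv (pvStepA kp p) (pvStepB (fs, df) p).1 (pvStepB (fs, df) p).2 := by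
  obtain ⟨hkeys, hnd, hpt⟩ := h
  unfold pvStepA pvStepB
  by_cases hig : pvIgnoreKeys.contains p.1 = true
  · simp only [if_pos hig]; exact ⟨hkeys, hnd, hpt⟩
  · simp only [if_neg hig]
    rcases hfs : fs.get? p.1 with _ | v0
    · -- p.1 is a fresh key: A starts a singleton set, B records the first value
      dsimp only
      have hmem : p.1 ∉ fs.keys := (PySem.Dict.get?_eq_none_iff_not_mem_keys fs p.1).mp hfs
      have hmem' : p.1 ∉ kp.keys := hkeys ▸ hmem
      have hc : kp.contains p.1 = false := by
        rw [PySem.Dict.contains_eq_decide_mem_keys]; simp [hmem']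
      have hcf : fs.contains p.1 = false := by
        rw [PySem.Dict.contains_eq_decide_mem_keys]; simp [hmem]
      have hkk : (kp.modify p.1 PySem.Set.empty (fun s => s.add p.2)).keys = kp.keys ++ [p.1] := by
        rw [PySem.Dict.keys_modify, PySem.Dict.keys_insert_of_not_contains _ _ hc]
      refine ⟨?_, ?_, ?_⟩
      · rw [hkk, PySem.Dict.keys_insert_of_not_contains _ _ hcf, hkeys]
      · rw [hkk]
        simp only [List.nodup_append]
        refine ⟨hnd, by simp, ?_⟩
        intro a ha b hb
        rw [List.mem_singleton] at hb
        intro hab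
        exact hmem' (hb ▸ hab ▸ ha)
      · intro k
        constructor
        · intro hkmem
          rw [hkk] at hkmem
          by_cases hk : k = p.1
          · subst hk
            refine ⟨[], ?_, ?_⟩
            · rw [PySem.Dict.getD_modify, if_pos rfl,
                PySem.Dict.getD_of_not_contains kp PySem.Set.empty hc,
                PySem.Dict.getD_insert_self]
              simp [PySem.Set.empty, PySem.Set.add]
            · have hnd2 := (hpt p.1).2 hmem'
              simp [hnd2]
          · have hkmem' : k ∈ kp.keys := by
              rcases List.mem_append.mp hkmem with h1 | h1
              · exact h1
              · simp at h1; exact absurd h1 hk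
            obtain ⟨rest, hrest, hdf⟩ := (hpt k).1 hkmem'
            refine ⟨rest, ?_, hdf⟩
            rw [PySem.Dict.getD_modify, if_neg hk, PySem.Dict.getD_insert, if_neg hk]
            exact hrest
        · intro hkmem
          rw [hkk] at hkmem
          have hknotin : k ∉ kp.keys := fun hx => hkmem (by simp [hx])
          exact (hpt k).2 hknotin
    · -- p.1 already seen; its first-seen value is v0
      dsimp only
      have hv0 : fs.getD p.1 "" = v0 := PySem.Dict.getD_of_get?_eq_some fs "" hfs
      have hmem : p.1 ∈ fs.keys := by
        by_contra hx
        rw [← PySem.Dict.get?_eq_none_iff_not_mem_keys] at hx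
        rw [hfs] at hx; simp at hx
      have hmem' : p.1 ∈ kp.keys := hkeys ▸ hmem
      obtain ⟨rest, hrest, hdf⟩ := (hpt p.1).1 hmem'
      have hkk : (kp.modify p.1 PySem.Set.empty (fun s => s.add p.2)).keys = kp.keys := by
        rw [PySem.Dict.keys_modify, PySem.Dict.keys_insert_of_contains]
        rw [PySem.Dict.contains_eq_decide_mem_keys]; simp [hmem']
      have hsadd : kp.getD p.1 PySem.Set.empty = v0 :: rest := by rw [hrest, hv0]
      by_cases hne : p.2 ≠ v0
      · simp only [if_pos hne]
        refine ⟨by rw [hkk, hkeys], by rw [hkk]; exact hnd, ?_⟩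
        intro k
        constructor
        · intro hkmem
          rw [hkk] at hkmem
          by_cases hk : k = p.1
          · subst hk
            rw [PySem.Dict.getD_modify, if_pos rfl, hsadd]
            rw [PySem.Set.add_eq_ite]
            by_cases hv : p.2 ∈ v0 :: rest
            · have hvr : p.2 ∈ rest := by
                rcases List.mem_cons.mp hv with h1 | h1
                · exact absurd h1 hne
                · exact h1
              refine ⟨rest, by simp [hv, hv0], ?_⟩
              constructor
              · intro _; exact List.ne_nil_of_mem hvr
              · intro _; simp [PySem.Set.mem_add]
            · refine ⟨rest ++ [p.2], by simp [hv, hv0], ?_⟩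
              constructor
              · intro _; simp
              · intro _; simp [PySem.Set.mem_add]
          · obtain ⟨r', hr', hdf'⟩ := (hpt k).1 hkmem
            refine ⟨r', ?_, ?_⟩
            · rw [PySem.Dict.getD_modify, if_neg hk]; exact hr'
            · rw [PySem.Set.mem_add]
              constructor
              · rintro (h1 | h1)
                · exact hdf'.mp h1
                · exact absurd h1 hk
              · intro h1; exact Or.inl (hdf'.mpr h1)
        · intro hkmem
          rw [hkk] at hkmem
          have hk : k ≠ p.1 := fun hx => hkmem (hx ▸ hmem')
          intro hx
          rcases (PySem.Set.mem_add df p.1 k).mp hx with h1 | h1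
          · exact (hpt k).2 hkmem h1
          · exact hk h1
      · simp only [if_neg hne]
        have hv : p.2 = v0 := by by_contra hx; exact hne hx
        refine ⟨by rw [hkk, hkeys], by rw [hkk]; exact hnd, ?_⟩
        intro k
        constructor
        · intro hkmem
          rw [hkk] at hkmem
          by_cases hk : k = p.1
          · subst hk
            rw [PySem.Dict.getD_modify, if_pos rfl, hsadd, hv]
            rw [PySem.Set.add_eq_ite, if_pos (by simp)]
            exact ⟨rest, by simp [hv0], hdf⟩
          · obtain ⟨r', hr', hdf'⟩ := (hpt k).1 hkmem
            refine ⟨r', ?_, hdf'⟩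
            rw [PySem.Dict.getD_modify, if_neg hk]; exact hr'
        · intro hkmem; rw [hkk] at hkmem; exact (hpt k).2 hkmem

lemma pvInv_fold (ps : List (String × String)) :
    ∀ (kp : PySem.Dict String (PySem.Set String))
      (st : PySem.Dict String String × PySem.Set String),
      pvInv kp st.1 st.2 →
      pvInv (ps.foldl pvStepA kp) (ps.foldl pvStepB st).1 (ps.foldl pvStepB st).2 := by
  induction ps with
  | nil => intro kp st h; exact h
  | cons p ps ih =>
    intro kp st h
    simp only [List.foldl_cons]
    exact ih _ (pvStepB st p) (pvInv_step kp st.1 st.2 p h)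

lemma pvInv_fold_metas (metas : List (List (String × String))) :
    ∀ (kp : PySem.Dict String (PySem.Set String))
      (st : PySem.Dict String String × PySem.Set String),
      pvInv kp st.1 st.2 →
      pvInv (metas.foldl (fun kp m => ((PySem.Dict.ofList m).items).foldl pvStepA kp) kp)
        (metas.foldl (fun st m => ((PySem.Dict.ofList m).items).foldl pvStepB st) st).1
        (metas.foldl (fun st m => ((PySem.Dict.ofList m).items).foldl pvStepB st) st).2 := by
  induction metas with
  | nil => intro kp st h; exact h
  | cons m ms ih =>
    intro kp st h
    simp only [List.foldl_cons]
    exact ih _ _ (pvInv_fold _ kp st h)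

-- extraction: under the pointwise condition, A's append-loop over items equals a key filter
lemma pvExtract (df : PySem.Set String) :
    ∀ (l : List (String × PySem.Set String)) (acc : List String),
      (∀ kv ∈ l, (1 < kv.2.length ↔ kv.1 ∈ df)) →
      l.foldl (fun ret kv => if 1 < PySem.Set.len kv.2 then ret ++ [kv.1] else ret) acc
        = acc ++ (l.map (·.1)).filter (fun k => df.contains k) := by
  intro l
  induction l with
  | nil => intro acc _; simp
  | cons x xs ih =>
    intro acc h
    have hx := h x (by simp)
    simp only [List.foldl_cons, List.map_cons, List.filter_cons]
    by_cases hc : (1:Int) < PySem.Set.len x.2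
    · have hlen : 1 < x.2.length := by simpa [PySem.Set.len] using hc
      have hmemx : x.1 ∈ df := hx.mp hlen
      rw [if_pos hc, ih _ (fun kv hkv => h kv (by simp [hkv]))]
      simp [hmemx]
    · have hlen : ¬ 1 < x.2.length := by
        intro hx'
        exact hc (by simpa [PySem.Set.len] using (Int.ofNat_lt.mpr hx'))
      have hmemx : x.1 ∉ df := fun hm => hlen (hx.mpr hm)
      rw [if_neg hc, ih _ (fun kv hkv => h kv (by simp [hkv]))]
      simp [hmemx]

-- ===== VERDICT (by name: the statement is the Claim_ definition above) =====
theorem get_different_meta_keys_py_spec : Claim_equal_get_different_meta_keys_py := by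
  intro metas _
  unfold Spec_get_different_meta_keys_py get_different_meta_keys_py get_different_meta_keys_py_alt
  have hinv0 : pvInv (PySem.Dict.empty)
      ((PySem.Dict.empty, (PySem.Set.empty : PySem.Set String)) : PySem.Dict String String × PySem.Set String).1
      ((PySem.Dict.empty, (PySem.Set.empty : PySem.Set String)) : PySem.Dict String String × PySem.Set String).2 := by
    refine ⟨rfl, by simp [PySem.Dict.keys_empty], ?_⟩
    intro k
    constructor
    · intro hk; rw [PySem.Dict.keys_empty] at hk; simp at hk
    · intro _ hk; simp [PySem.Set.empty] at hk
  have hinv := pvInv_fold_metas metas PySem.Dict.empty (PySem.Dict.empty, PySem.Set.empty) hinv0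
  obtain ⟨hkeys, hnd, hpt⟩ := hinv
  set kp := metas.foldl (fun kp m => ((PySem.Dict.ofList m).items).foldl pvStepA kp) PySem.Dict.empty with hkp
  set st := metas.foldl (fun st m => ((PySem.Dict.ofList m).items).foldl pvStepB st)
    ((PySem.Dict.empty, PySem.Set.empty) : PySem.Dict String String × PySem.Set String) with hst
  have hcond : ∀ kv ∈ kp.items, (1 < kv.2.length ↔ kv.1 ∈ st.2) := by
    rintro ⟨k, v⟩ hkv
    have hget : kp.get? k = some v := PySem.Dict.get?_of_mem_items kp hkv hnd
    have hk : k ∈ kp.keys := PySem.Dict.mem_keys_of_mem_items kp hkv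
    obtain ⟨rest, hrest, hdf⟩ := (hpt k).1 hk
    have hgv : kp.getD k PySem.Set.empty = v := PySem.Dict.getD_of_get?_eq_some kp PySem.Set.empty hget
    rw [hgv] at hrest
    rw [hrest]
    simp only [List.length_cons]
    constructor
    · intro hl
      refine hdf.mpr ?_
      intro hx; subst hx; simp at hl
    · intro hm
      have h1 := hdf.mp hm
      have h2 : rest.length ≠ 0 := fun hx => h1 (List.eq_nil_of_length_eq_zero hx)
      omega

  have hext := pvExtract st.2 kp.items [] hcond
  simp only [List.nil_append] at hext
  rw [hext]
  have : kp.items.map (·.1) = kp.keys := rfl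
  rw [this, hkeys]
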